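-- pv_equiv track=rewrite | github.com/guige2023/rabai_autoclick | utils/puzzle_utils.py | _is_unit_valid
-- ===== SOURCE A (Python) =====
-- from typing import List, Dict, Optional, Set, Tuple, Any
--
-- def _is_unit_valid(unit: List[int]) -> bool:
--     seen: Set[int] = set()
--     for v in unit:
--         if v != 0:
--             if v in seen:
--                 return False
--             seen.add(v)
--     return True
-- ===== SOURCE B (Python) =====
-- from typing import List
--
-- def _is_unit_valid(unit: List[int]) -> bool:
--     nz = sorted(v for v in unit if v != 0)
--     return all(a != b for a, b in zip(nz, nz[1:]))
-- ===== Notes on version B (the rewrite author's own statement) =====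
-- stated objective: alternative
-- what changed: Replaces the incremental seen-set with early return by a sort-based scan: sort the nonzero values and check that no two adjacent sorted values are equal; no set is used at all.
import Mathlib
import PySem

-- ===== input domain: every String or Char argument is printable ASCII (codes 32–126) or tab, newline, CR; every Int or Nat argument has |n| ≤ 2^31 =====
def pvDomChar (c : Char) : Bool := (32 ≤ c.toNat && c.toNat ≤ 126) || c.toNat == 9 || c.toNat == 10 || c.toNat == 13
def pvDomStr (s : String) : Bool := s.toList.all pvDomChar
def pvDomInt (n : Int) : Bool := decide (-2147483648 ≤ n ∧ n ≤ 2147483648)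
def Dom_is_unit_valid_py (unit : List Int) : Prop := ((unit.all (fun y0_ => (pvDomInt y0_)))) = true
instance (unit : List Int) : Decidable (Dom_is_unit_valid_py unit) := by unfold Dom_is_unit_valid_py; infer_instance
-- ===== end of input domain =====

-- B replaces A's incremental seen-set loop (early return on a collision) by a sort-based
-- duplicate scan: sort the nonzero values and check no two adjacent sorted values are
-- equal; objective: alternative (no set data structure at all).

-- ===== PORT A =====
-- the 'for v in unit' loop with accumulator 'seen', early 'return False' on a repeat
def isUnitValidLoop (seen : PySem.Set Int) : List Int → Bool
  | [] => true
  | v :: rest =>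
    if v ≠ 0 then
      if PySem.Set.contains seen v then false
      else isUnitValidLoop (PySem.Set.add seen v) rest
    else isUnitValidLoop seen rest

def is_unit_valid_py (unit : List Int) : Bool :=
  isUnitValidLoop PySem.Set.empty unit

-- ===== PORT B =====
-- nz = sorted(v for v in unit if v != 0); all(a != b for a, b in zip(nz, nz[1:]))
def is_unit_valid_py_alt (unit : List Int) : Bool :=
  let nz := PySem.List.sorted (unit.filter (fun v => decide (v ≠ 0))) (fun x => x) false
  (nz.zip (PySem.List.slice nz (some 1) none)).all (fun p => decide (p.1 ≠ p.2))

-- ===== PRECONDITION & SPEC =====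
def Spec_is_unit_valid_py (unit : List Int) (out : Bool) : Prop := out = is_unit_valid_py_alt unit
instance (unit : List Int) (out : Bool) : Decidable (Spec_is_unit_valid_py unit out) := by unfold Spec_is_unit_valid_py; infer_instance

-- ===== CLAIM (what is proved, stated in full; the proofs are below) =====
def Claim_equal_is_unit_valid_py : Prop := ∀ (unit : List Int), Dom_is_unit_valid_py unit → Spec_is_unit_valid_py unit (is_unit_valid_py unit)

-- ===== LEMMAS AND PROOFS =====

-- A's loop returns true iff the nonzero elements are duplicate-free (and none already seen)
theorem loop_true_iff (l : List Int) : ∀ (seen : PySem.Set Int),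
    isUnitValidLoop seen l = true ↔
      ((l.filter (fun v => decide (v ≠ 0))).Nodup ∧
        ∀ v ∈ l.filter (fun v => decide (v ≠ 0)), v ∉ seen) := by
  induction l with
  | nil => intro seen; simp [isUnitValidLoop]
  | cons x xs ih =>
    intro seen
    by_cases hx : x = 0
    · subst hx
      simp [isUnitValidLoop, ih]
    · have hfc : (x :: xs).filter (fun v => decide (v ≠ 0))
          = x :: xs.filter (fun v => decide (v ≠ 0)) := by simp [hx]
      by_cases hc : x ∈ seen
      · have : isUnitValidLoop seen (x :: xs) = false := by
          simp [isUnitValidLoop, hx, PySem.Set.contains, hc]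
        rw [this, hfc]
        simp only [Bool.false_eq_true, false_iff, List.nodup_cons]
        rintro ⟨_, hall⟩
        exact (hall x (by simp)) hc
      · have hstep : isUnitValidLoop seen (x :: xs)
            = isUnitValidLoop (PySem.Set.add seen x) xs := by
          simp [isUnitValidLoop, hx, PySem.Set.contains, hc]
        rw [hstep, ih, hfc]
        simp only [List.nodup_cons, List.mem_cons, PySem.Set.mem_add]
        constructor
        · rintro ⟨hnd, hall⟩
          refine ⟨⟨fun hm => (hall x hm) (Or.inr rfl), hnd⟩, ?_⟩
          rintro v (rfl | hv)
          · exact hc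
          · exact fun hvs => (hall v hv) (Or.inl hvs)
        · rintro ⟨⟨hxm, hnd⟩, hall⟩
          refine ⟨hnd, fun v hv hor => ?_⟩
          rcases hor with hvs | rfl
          · exact (hall v (Or.inr hv)) hvs
          · exact hxm hv

-- on a (≤)-sorted list, the zip-with-tail adjacent-distinct scan detects exactly Nodup
theorem adj_scan_iff_nodup : ∀ (l : List Int), l.Pairwise (· ≤ ·) →
    (((l.zip l.tail).all (fun p => decide (p.1 ≠ p.2)) = true) ↔ l.Nodup) := by
  intro l
  induction l with
  | nil => simp
  | cons a t ih =>
    intro hp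
    cases t with
    | nil => simp
    | cons b t' =>
      rcases List.pairwise_cons.mp hp with ⟨ha, hp'⟩
      have hb : ∀ x ∈ t', b ≤ x := (List.pairwise_cons.mp hp').1
      simp only [List.tail_cons] at ih ⊢
      simp only [List.zip_cons_cons, List.all_cons, Bool.and_eq_true, decide_eq_true_iff]
      rw [List.nodup_cons, ih hp']
      constructor
      · rintro ⟨hab, hrest⟩
        refine ⟨?_, hrest⟩
        intro hm
        rcases List.mem_cons.mp hm with h | hmem
        · exact hab h
        · exact hab (le_antisymm (ha b (by simp)) (hb a hmem))
      · rintro ⟨hnot, hrest⟩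
        exact ⟨fun h => hnot (by simp [h]), hrest⟩

-- ===== VERDICT (by name: the statement is the Claim_ definition above) =====
theorem is_unit_valid_py_spec : Claim_equal_is_unit_valid_py := by
  intro unit _
  unfold Spec_is_unit_valid_py is_unit_valid_py is_unit_valid_py_alt
  simp only [PySem.List.slice_from_one]
  set f := unit.filter (fun v => decide (v ≠ 0)) with hf
  set nz := PySem.List.sorted f (fun x => x) false with hnz
  rw [Bool.eq_iff_iff, loop_true_iff,
    adj_scan_iff_nodup nz (by simpa using PySem.List.sorted_pairwise f (fun x => x))]
  have hperm : nz.Perm f := PySem.List.sorted_perm f (fun x => x) false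
  rw [hperm.nodup_iff]
  simp [hf, PySem.Set.empty]
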